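-- pv_equiv track=rewrite | github.com/maciejGolebio/advent-of-code-2024 | day16/part2/main.py | find_shortest_path_tiles
-- ===== SOURCE A (Python) =====
-- from typing import List, Tuple
-- from collections import deque
--
-- def get_new_direction_clockwise(dx: int, dy: int) -> Tuple[int, int]:
--     if (dx, dy) == (0, 1):  # down
--         return (-1, 0)  # left
--     elif (dx, dy) == (-1, 0):  # left
--         return (0, -1)  # up
--     elif (dx, dy) == (0, -1):  # up
--         return (1, 0)  # right
--     elif (dx, dy) == (1, 0):  # right
--         return (0, 1)  # down
--
-- def get_new_direction_anticlockwise(dx: int, dy: int) -> Tuple[int, int]: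
--     if (dx, dy) == (0, 1):  # down
--         return (1, 0)  # right
--     elif (dx, dy) == (1, 0):  # right
--         return (0, -1)  # up
--     elif (dx, dy) == (0, -1):  # up
--         return (-1, 0)  # left
--     elif (dx, dy) == (-1, 0):  # left
--         return (0, 1)  # down
--
-- def find_shortest_path_tiles(visited: dict, end: Tuple[int, int]) -> int:
--     end_x, end_y = end
--     # Find minimal cost to reach E
--     end_states = [
--         (x, y, dx, dy) for (x, y, dx, dy) in visited if (x, y) == (end_x, end_y)
--     ]
--     if not end_states:
--         return 0
--     min_cost = min(visited[s] for s in end_states)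
--     end_states = [s for s in end_states if visited[s] == min_cost]
--
--
--     in_shortest_path = set(end_states)
--     shortest_path_tiles = {(end_x, end_y)}
--
--     queue = deque(end_states)
--
--     def inverse_clockwise(dx, dy):
--         return get_new_direction_anticlockwise(dx, dy)
--
--     def inverse_anticlockwise(dx, dy):
--         return get_new_direction_clockwise(dx, dy)
--
--     while queue:
--         x, y, dx, dy = queue.popleft()
--         c = visited[(x, y, dx, dy)]
--
--         # Forward predecessor
--         fx, fy = x - dx, y - dy
--         prev_cost = c - 1
--         if (
--             prev_cost >= 0
--             and (fx, fy, dx, dy) in visited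
--             and visited[(fx, fy, dx, dy)] == prev_cost
--         ):
--             if (fx, fy, dx, dy) not in in_shortest_path:
--                 in_shortest_path.add((fx, fy, dx, dy))
--                 shortest_path_tiles.add((fx, fy))
--                 queue.append((fx, fy, dx, dy))
--
--         # Clockwise predecessor
--         prev_cost = c - 1000
--         if prev_cost >= 0:
--             # current_dir = clockwise(prev_dir) => prev_dir = inverse_clockwise(current_dir)
--             prev_dx, prev_dy = inverse_clockwise(dx, dy)
--             if (x, y, prev_dx, prev_dy) in visited and visited[
--                 (x, y, prev_dx, prev_dy)
--             ] == prev_cost: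
--                 if (x, y, prev_dx, prev_dy) not in in_shortest_path:
--                     in_shortest_path.add((x, y, prev_dx, prev_dy))
--                     shortest_path_tiles.add((x, y))
--                     queue.append((x, y, prev_dx, prev_dy))
--
--         # Anticlockwise predecessor
--         prev_cost = c - 1000
--         if prev_cost >= 0:
--             # current_dir = anticlockwise(prev_dir) => prev_dir = inverse_anticlockwise(current_dir)
--             prev_dx, prev_dy = inverse_anticlockwise(dx, dy)
--             if (x, y, prev_dx, prev_dy) in visited and visited[
--                 (x, y, prev_dx, prev_dy)
--             ] == prev_cost:
--                 if (x, y, prev_dx, prev_dy) not in in_shortest_path: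
--                     in_shortest_path.add((x, y, prev_dx, prev_dy))
--                     shortest_path_tiles.add((x, y))
--                     queue.append((x, y, prev_dx, prev_dy))
--
--     return len(shortest_path_tiles)
-- ===== SOURCE B (Python) =====
-- from typing import Tuple
--
-- def get_new_direction_clockwise(dx: int, dy: int) -> Tuple[int, int]:
--     if (dx, dy) == (0, 1):
--         return (-1, 0)
--     elif (dx, dy) == (-1, 0):
--         return (0, -1)
--     elif (dx, dy) == (0, -1):
--         return (1, 0)
--     elif (dx, dy) == (1, 0):
--         return (0, 1)
--
-- def get_new_direction_anticlockwise(dx: int, dy: int) -> Tuple[int, int]: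
--     if (dx, dy) == (0, 1):
--         return (1, 0)
--     elif (dx, dy) == (1, 0):
--         return (0, -1)
--     elif (dx, dy) == (0, -1):
--         return (-1, 0)
--     elif (dx, dy) == (-1, 0):
--         return (0, 1)
--
-- def find_shortest_path_tiles(visited: dict, end: Tuple[int, int]) -> int:
--     end_x, end_y = end
--     end_states = [s for s in visited if (s[0], s[1]) == (end_x, end_y)]
--     if not end_states:
--         return 0
--     min_cost = min(visited[s] for s in end_states)
--     members = {s for s in end_states if visited[s] == min_cost}
--     # Single descending-cost sweep: every valid predecessor has a strictly
--     # smaller cost, so it is visited strictly later in this order and the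
--     # sweep reaches the full backward closure in one pass.
--     for s in sorted(visited, key=lambda k: visited[k], reverse=True):
--         if s not in members:
--             continue
--         x, y, dx, dy = s
--         c = visited[s]
--         t = (x - dx, y - dy, dx, dy)
--         if c - 1 >= 0 and visited.get(t) == c - 1:
--             members.add(t)
--         if c - 1000 >= 0:
--             pd = get_new_direction_anticlockwise(dx, dy)
--             if pd is not None:
--                 t = (x, y, pd[0], pd[1])
--                 if visited.get(t) == c - 1000:
--                     members.add(t)
--             pd = get_new_direction_clockwise(dx, dy)
--             if pd is not None:
--                 t = (x, y, pd[0], pd[1])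
--                 if visited.get(t) == c - 1000:
--                     members.add(t)
--     tiles = {(end_x, end_y)} | {(x, y) for (x, y, dx, dy) in members}
--     return len(tiles)
-- ===== Notes on version B (the rewrite author's own statement) =====
-- stated objective: alternative
-- what changed: Replaces the worklist BFS (deque + incremental tile set) with a single sweep over all states sorted by cost in descending order: each member reached is expanded once, and since every valid predecessor has strictly smaller cost it is always swept strictly later, so one pass computes the same backward closure; tiles are derived from the final member set at the end.
import Mathlib
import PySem

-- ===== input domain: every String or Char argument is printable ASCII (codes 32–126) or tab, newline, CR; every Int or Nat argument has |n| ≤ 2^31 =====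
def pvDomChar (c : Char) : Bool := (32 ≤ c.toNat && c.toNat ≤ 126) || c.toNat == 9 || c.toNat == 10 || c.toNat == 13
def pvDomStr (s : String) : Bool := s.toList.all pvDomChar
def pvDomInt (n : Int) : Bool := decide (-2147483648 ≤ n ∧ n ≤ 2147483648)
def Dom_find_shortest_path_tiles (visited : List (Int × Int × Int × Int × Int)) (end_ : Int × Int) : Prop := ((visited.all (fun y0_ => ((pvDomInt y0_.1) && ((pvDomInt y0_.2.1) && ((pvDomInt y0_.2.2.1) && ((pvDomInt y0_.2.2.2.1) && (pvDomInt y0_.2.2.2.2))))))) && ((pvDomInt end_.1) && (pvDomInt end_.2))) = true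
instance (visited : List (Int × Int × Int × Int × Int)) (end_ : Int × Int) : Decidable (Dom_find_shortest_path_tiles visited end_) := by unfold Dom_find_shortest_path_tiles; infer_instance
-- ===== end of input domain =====

-- B replaces A's worklist BFS by a single sweep over the states sorted by cost descending
-- (objective: alternative decomposition, same result; equivalence proved on the return value).

-- ===== PORT A =====
-- shared module helper (Python returns None on non-unit directions → Option)
def get_new_direction_clockwise (dx dy : Int) : Option (Int × Int) :=
  if dx = 0 ∧ dy = 1 then some (-1, 0)
  else if dx = -1 ∧ dy = 0 then some (0, -1)
  else if dx = 0 ∧ dy = -1 then some (1, 0)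
  else if dx = 1 ∧ dy = 0 then some (0, 1)
  else none

def get_new_direction_anticlockwise (dx dy : Int) : Option (Int × Int) :=
  if dx = 0 ∧ dy = 1 then some (1, 0)
  else if dx = 1 ∧ dy = 0 then some (0, -1)
  else if dx = 0 ∧ dy = -1 then some (-1, 0)
  else if dx = -1 ∧ dy = 0 then some (0, 1)
  else none

-- argument decoding shared by both ports: the Python parameter is a dict keyed by (x,y,dx,dy)
def pvDictOf (visited : List (Int × Int × Int × Int × Int)) :
    PySem.Dict (Int × Int × Int × Int) Int :=
  PySem.Dict.ofList (visited.map (fun q => ((q.1, q.2.1, q.2.2.1, q.2.2.2.1), q.2.2.2.2)))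

-- one predecessor-candidate attempt of A's loop body (candidate state, required prev cost, tile)
def pvTryAdd (d : PySem.Dict (Int × Int × Int × Int) Int)
    (st : PySem.Set (Int × Int × Int × Int) × PySem.Set (Int × Int) × List (Int × Int × Int × Int))
    (cand : (Int × Int × Int × Int) × Int × (Int × Int)) :
    PySem.Set (Int × Int × Int × Int) × PySem.Set (Int × Int) × List (Int × Int × Int × Int) :=
  if 0 ≤ cand.2.1 ∧ d.contains cand.1 ∧ d.getD cand.1 0 = cand.2.1 ∧ ¬ cand.1 ∈ st.1 then
    (PySem.Set.add st.1 cand.1, PySem.Set.add st.2.1 cand.2.2, st.2.2 ++ [cand.1])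
  else st

-- the three predecessor candidates A examines for a popped state (forward, clockwise, anticlockwise);
-- a 'none' rotation is where Python's unpacking of None raises TypeError — excluded by Pre_
def pvCands (d : PySem.Dict (Int × Int × Int × Int) Int) (s : Int × Int × Int × Int) :
    List ((Int × Int × Int × Int) × Int × (Int × Int)) :=
  let c := d.getD s 0
  [((s.1 - s.2.2.1, s.2.1 - s.2.2.2, s.2.2.1, s.2.2.2), c - 1, (s.1 - s.2.2.1, s.2.1 - s.2.2.2))]
  ++ (if 0 ≤ c - 1000 then
        match get_new_direction_anticlockwise s.2.2.1 s.2.2.2 with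
        | some pd => [((s.1, s.2.1, pd.1, pd.2), c - 1000, (s.1, s.2.1))]
        | none => []
      else [])
  ++ (if 0 ≤ c - 1000 then
        match get_new_direction_clockwise s.2.2.1 s.2.2.2 with
        | some pd => [((s.1, s.2.1, pd.1, pd.2), c - 1000, (s.1, s.2.1))]
        | none => []
      else [])

def pvMeasure (d : PySem.Dict (Int × Int × Int × Int) Int)
    (inPath : PySem.Set (Int × Int × Int × Int)) (queue : List (Int × Int × Int × Int)) : Nat :=
  (d.keys.filter (fun k => decide (k ∉ inPath))).length + queue.length

lemma pvFilter_not_mem_add_lt (l : List (Int × Int × Int × Int))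
    (s : PySem.Set (Int × Int × Int × Int)) (a : Int × Int × Int × Int)
    (ha : a ∈ l) (hna : a ∉ s) :
    (l.filter (fun k => decide (k ∉ PySem.Set.add s a))).length
      < (l.filter (fun k => decide (k ∉ s))).length := by
  have hpred : (fun (k : Int × Int × Int × Int) => decide (k ∉ PySem.Set.add s a))
      = fun k => decide (k ≠ a) && decide (k ∉ s) := by
    funext k; simp only [PySem.Set.mem_add, decide_not]
    by_cases h1 : k ∈ s <;> by_cases h2 : k = a <;> simp [h1, h2]
  rw [hpred, ← List.filter_filter]
  apply List.length_filter_lt_length_iff_exists.mpr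
  exact ⟨a, by simp [ha, hna], by simp⟩

lemma pvTryAdd_measure (d : PySem.Dict (Int × Int × Int × Int) Int) st cand :
    pvMeasure d (pvTryAdd d st cand).1 (pvTryAdd d st cand).2.2 ≤ pvMeasure d st.1 st.2.2 := by
  unfold pvTryAdd
  split_ifs with h
  · obtain ⟨-, hc, -, hm⟩ := h
    have hk : cand.1 ∈ d.keys := (PySem.Dict.contains_iff_mem_keys d cand.1).mp hc
    have := pvFilter_not_mem_add_lt d.keys st.1 cand.1 hk hm
    simp only [pvMeasure, List.length_append, List.length_cons, List.length_nil]
    omega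
  · exact le_refl _

lemma pvFoldl_measure (d : PySem.Dict (Int × Int × Int × Int) Int) (l : List ((Int × Int × Int × Int) × Int × (Int × Int))) (st) :
    pvMeasure d (l.foldl (pvTryAdd d) st).1 (l.foldl (pvTryAdd d) st).2.2 ≤ pvMeasure d st.1 st.2.2 := by
  induction l generalizing st with
  | nil => exact le_refl _
  | cons c t ih => exact le_trans (ih _) (pvTryAdd_measure d st c)

-- A's BFS while-loop; returns the final (in_shortest_path, shortest_path_tiles)
def pvBFS (d : PySem.Dict (Int × Int × Int × Int) Int)
    (inPath : PySem.Set (Int × Int × Int × Int)) (tiles : PySem.Set (Int × Int))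
    (queue : List (Int × Int × Int × Int)) :
    PySem.Set (Int × Int × Int × Int) × PySem.Set (Int × Int) :=
  match queue with
  | [] => (inPath, tiles)
  | s :: rest =>
    let st := (pvCands d s).foldl (pvTryAdd d) (inPath, tiles, rest)
    pvBFS d st.1 st.2.1 st.2.2
termination_by pvMeasure d inPath queue
decreasing_by
  calc pvMeasure d st.1 st.2.2 ≤ pvMeasure d inPath rest := pvFoldl_measure d _ _
    _ < pvMeasure d inPath (s :: rest) := by simp [pvMeasure]

def find_shortest_path_tiles (visited : List (Int × Int × Int × Int × Int)) (end_ : Int × Int) : Int :=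
  let d := pvDictOf visited
  let end_states := d.keys.filter (fun s => decide (s.1 = end_.1 ∧ s.2.1 = end_.2))
  if end_states = [] then 0
  else
    let min_cost := (PySem.List.min? (end_states.map (fun s => d.getD s 0)) (fun v => v)).getD 0
    let seeds := end_states.filter (fun s => decide (d.getD s 0 = min_cost))
    let res := pvBFS d (PySem.Set.ofList seeds)
      (PySem.Set.add PySem.Set.empty (end_.1, end_.2)) seeds
    (res.2.length : Int)

-- ===== PORT B =====
-- Source B's expansion of one member s: add its (up to three) valid predecessors
def pvExpand (d : PySem.Dict (Int × Int × Int × Int) Int)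
    (m : PySem.Set (Int × Int × Int × Int)) (s : Int × Int × Int × Int) :
    PySem.Set (Int × Int × Int × Int) :=
  let c := d.getD s 0
  let m1 := if 0 ≤ c - 1 ∧ d.get? (s.1 - s.2.2.1, s.2.1 - s.2.2.2, s.2.2.1, s.2.2.2) = some (c - 1)
    then PySem.Set.add m (s.1 - s.2.2.1, s.2.1 - s.2.2.2, s.2.2.1, s.2.2.2) else m
  let m2 := if 0 ≤ c - 1000 then
      match get_new_direction_anticlockwise s.2.2.1 s.2.2.2 with
      | some pd => if d.get? (s.1, s.2.1, pd.1, pd.2) = some (c - 1000)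
          then PySem.Set.add m1 (s.1, s.2.1, pd.1, pd.2) else m1
      | none => m1
    else m1
  if 0 ≤ c - 1000 then
    match get_new_direction_clockwise s.2.2.1 s.2.2.2 with
    | some pd => if d.get? (s.1, s.2.1, pd.1, pd.2) = some (c - 1000)
        then PySem.Set.add m2 (s.1, s.2.1, pd.1, pd.2) else m2
    | none => m2
  else m2

def find_shortest_path_tiles_alt (visited : List (Int × Int × Int × Int × Int)) (end_ : Int × Int) : Int :=
  let d := pvDictOf visited
  let end_states := d.keys.filter (fun s => decide (s.1 = end_.1 ∧ s.2.1 = end_.2))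
  if end_states = [] then 0
  else
    let min_cost := (PySem.List.min? (end_states.map (fun s => d.getD s 0)) (fun v => v)).getD 0
    let seeds := end_states.filter (fun s => decide (d.getD s 0 = min_cost))
    let order := PySem.List.sorted d.keys (fun k => d.getD k 0) true
    let members := order.foldl (fun m s => if s ∈ m then pvExpand d m s else m)
      (PySem.Set.ofList seeds)
    let tiles := PySem.Set.union (PySem.Set.ofList [(end_.1, end_.2)])
      (members.map (fun s => (s.1, s.2.1)))
    (tiles.length : Int)

-- ===== PRECONDITION & SPEC =====
-- A raises TypeError iff some minimum-cost end state has a direction other than the four unit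
-- vectors and that cost is ≥ 1000 (the rotation helper returns None and unpacking it fails);
-- Pre_ excludes exactly those inputs — A returns normally everywhere else (B returns everywhere).
def Pre_find_shortest_path_tiles (visited : List (Int × Int × Int × Int × Int)) (end_ : Int × Int) : Prop :=
  ¬ ∃ p ∈ (pvDictOf visited).items,
      p.1.1 = end_.1 ∧ p.1.2.1 = end_.2 ∧ 1000 ≤ p.2 ∧
      ¬ ((p.1.2.2.1 = 0 ∧ p.1.2.2.2 = 1) ∨ (p.1.2.2.1 = 0 ∧ p.1.2.2.2 = -1)
          ∨ (p.1.2.2.1 = 1 ∧ p.1.2.2.2 = 0) ∨ (p.1.2.2.1 = -1 ∧ p.1.2.2.2 = 0)) ∧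
      ∀ q ∈ (pvDictOf visited).items, q.1.1 = end_.1 → q.1.2.1 = end_.2 → p.2 ≤ q.2

instance (visited : List (Int × Int × Int × Int × Int)) (end_ : Int × Int) :
    Decidable (Pre_find_shortest_path_tiles visited end_) := by
  unfold Pre_find_shortest_path_tiles; infer_instance

def pvWitness_find_shortest_path_tiles : (List (Int × Int × Int × Int × Int)) × (Int × Int) :=
  ([(0, 0, 0, 1, 1001), (0, 1, 0, 1, 1000), (0, 1, 1, 0, 0)], (0, 1))

def Spec_find_shortest_path_tiles (visited : List (Int × Int × Int × Int × Int)) (end_ : Int × Int) (out : Int) : Prop := out = find_shortest_path_tiles_alt visited end_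
instance (visited : List (Int × Int × Int × Int × Int)) (end_ : Int × Int) (out : Int) : Decidable (Spec_find_shortest_path_tiles visited end_ out) := by unfold Spec_find_shortest_path_tiles; infer_instance

-- ===== CLAIM (what is proved, stated in full; the proofs are below) =====
def Claim_equal_find_shortest_path_tiles : Prop := ∀ (visited : List (Int × Int × Int × Int × Int)) (end_ : Int × Int), Dom_find_shortest_path_tiles visited end_ → Pre_find_shortest_path_tiles visited end_ → Spec_find_shortest_path_tiles visited end_ (find_shortest_path_tiles visited end_)

-- ===== LEMMAS AND PROOFS =====

-- the backward edge relation both loops explore: t is a valid predecessor of s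
def pvPred (d : PySem.Dict (Int × Int × Int × Int) Int) (t s : Int × Int × Int × Int) : Prop :=
  t ∈ d.keys ∧ 0 ≤ d.getD t 0 ∧
  ( (s = (t.1 + t.2.2.1, t.2.1 + t.2.2.2, t.2.2.1, t.2.2.2) ∧ d.getD s 0 = d.getD t 0 + 1)
  ∨ (s.1 = t.1 ∧ s.2.1 = t.2.1 ∧ get_new_direction_clockwise t.2.2.1 t.2.2.2 = some (s.2.2.1, s.2.2.2) ∧ d.getD s 0 = d.getD t 0 + 1000)
  ∨ (s.1 = t.1 ∧ s.2.1 = t.2.1 ∧ get_new_direction_anticlockwise t.2.2.1 t.2.2.2 = some (s.2.2.1, s.2.2.2) ∧ d.getD s 0 = d.getD t 0 + 1000))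

def pvClosed (d : PySem.Dict (Int × Int × Int × Int) Int) (M : List (Int × Int × Int × Int)) : Prop :=
  ∀ s ∈ M, ∀ t, pvPred d t s → t ∈ M

lemma pvCw_acw (a b c e : Int) :
    get_new_direction_clockwise a b = some (c, e) ↔ get_new_direction_anticlockwise c e = some (a, b) := by
  unfold get_new_direction_clockwise get_new_direction_anticlockwise
  constructor <;> intro h <;> split_ifs at h with h1 h2 h3 h4 <;>
    (simp only [Option.some.injEq, Prod.mk.injEq] at h
     obtain ⟨h5, h6⟩ := h; subst h5; subst h6
     obtain ⟨rfl, rfl⟩ := ‹_ ∧ _›; norm_num)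

lemma pvGet?_eq_some_iff (d : PySem.Dict (Int × Int × Int × Int) Int) (k : Int × Int × Int × Int) (v : Int) :
    d.get? k = some v ↔ (d.contains k = true ∧ d.getD k 0 = v) := by
  rw [PySem.Dict.contains_eq_isSome_get?, PySem.Dict.getD_eq_get?_getD]
  cases h : d.get? k <;> simp

-- A's guard in pvTryAdd, abstracted
def pvGuard (d : PySem.Dict (Int × Int × Int × Int) Int)
    (e : (Int × Int × Int × Int) × Int × (Int × Int)) : Prop :=
  0 ≤ e.2.1 ∧ d.contains e.1 = true ∧ d.getD e.1 0 = e.2.1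

lemma pvMem_cands (d : PySem.Dict (Int × Int × Int × Int) Int) (s : Int × Int × Int × Int)
    (e : (Int × Int × Int × Int) × Int × (Int × Int)) :
    e ∈ pvCands d s ↔
      e = ((s.1 - s.2.2.1, s.2.1 - s.2.2.2, s.2.2.1, s.2.2.2), d.getD s 0 - 1,
            (s.1 - s.2.2.1, s.2.1 - s.2.2.2))
      ∨ (0 ≤ d.getD s 0 - 1000 ∧ ∃ pd, get_new_direction_anticlockwise s.2.2.1 s.2.2.2 = some pd
            ∧ e = ((s.1, s.2.1, pd.1, pd.2), d.getD s 0 - 1000, (s.1, s.2.1)))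
      ∨ (0 ≤ d.getD s 0 - 1000 ∧ ∃ pd, get_new_direction_clockwise s.2.2.1 s.2.2.2 = some pd
            ∧ e = ((s.1, s.2.1, pd.1, pd.2), d.getD s 0 - 1000, (s.1, s.2.1))) := by
  by_cases h1000 : 0 ≤ d.getD s 0 - 1000 <;>
    cases hacw : get_new_direction_anticlockwise s.2.2.1 s.2.2.2 <;>
    cases hcw : get_new_direction_clockwise s.2.2.1 s.2.2.2 <;>
      simp [pvCands, hacw, hcw]

lemma pvCands_tile (d : PySem.Dict (Int × Int × Int × Int) Int) (s : Int × Int × Int × Int)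
    (e : (Int × Int × Int × Int) × Int × (Int × Int)) (he : e ∈ pvCands d s) :
    e.2.2 = (e.1.1, e.1.2.1) := by
  rcases (pvMem_cands d s e).mp he with rfl | ⟨-, pd, -, rfl⟩ | ⟨-, pd, -, rfl⟩ <;> rfl

lemma pvCands_sound (d : PySem.Dict (Int × Int × Int × Int) Int) (s : Int × Int × Int × Int)
    (e : (Int × Int × Int × Int) × Int × (Int × Int)) (he : e ∈ pvCands d s)
    (hg : pvGuard d e) : pvPred d e.1 s := by
  obtain ⟨x, y, dx, dy⟩ := s
  obtain ⟨hg0, hgc, hgv⟩ := hg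
  rcases (pvMem_cands d _ e).mp he with rfl | ⟨h1000, pd, hpd, rfl⟩ | ⟨h1000, pd, hpd, rfl⟩ <;>
    unfold pvPred <;> dsimp only at hg0 hgc hgv ⊢
  · refine ⟨(PySem.Dict.contains_iff_mem_keys d _).mp hgc, by omega, Or.inl ⟨?_, by omega⟩⟩
    have e1 : x = x - dx + dx := by omega
    have e2 : y = y - dy + dy := by omega
    rw [← e1, ← e2]
  · refine ⟨(PySem.Dict.contains_iff_mem_keys d _).mp hgc, by omega,
      Or.inr (Or.inl ⟨rfl, rfl, ?_, by omega⟩)⟩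
    exact (pvCw_acw pd.1 pd.2 dx dy).mpr (by simpa using hpd)
  · refine ⟨(PySem.Dict.contains_iff_mem_keys d _).mp hgc, by omega,
      Or.inr (Or.inr ⟨rfl, rfl, ?_, by omega⟩)⟩
    exact (pvCw_acw dx dy pd.1 pd.2).mp (by simpa using hpd)

lemma pvCands_complete (d : PySem.Dict (Int × Int × Int × Int) Int) (s t : Int × Int × Int × Int)
    (hp : pvPred d t s) :
    ∃ e ∈ pvCands d s, e.1 = t ∧ pvGuard d e := by
  obtain ⟨x, y, dx, dy⟩ := s
  obtain ⟨tx, ty, tdx, tdy⟩ := t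
  obtain ⟨hk, h0, hcase⟩ := hp
  have hc : PySem.Dict.contains d (tx, ty, tdx, tdy) = true :=
    (PySem.Dict.contains_iff_mem_keys d _).mpr hk
  rcases hcase with ⟨hs, hv⟩ | ⟨h1, h2, hrot, hv⟩ | ⟨h1, h2, hrot, hv⟩
  · dsimp only at hs hv
    simp only [Prod.mk.injEq] at hs
    obtain ⟨e1, e2, e3, e4⟩ := hs
    refine ⟨_, (pvMem_cands d _ _).mpr (Or.inl rfl), ?_, ?_, ?_, ?_⟩ <;> (try dsimp only)
    · simp only [Prod.mk.injEq]; refine ⟨by omega, by omega, by omega, by omega⟩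
    · omega
    · have ht : ((x - dx, y - dy, dx, dy) : Int × Int × Int × Int) = (tx, ty, tdx, tdy) := by
        simp only [Prod.mk.injEq]; refine ⟨by omega, by omega, by omega, by omega⟩
      rw [ht]; exact hc
    · have ht : ((x - dx, y - dy, dx, dy) : Int × Int × Int × Int) = (tx, ty, tdx, tdy) := by
        simp only [Prod.mk.injEq]; refine ⟨by omega, by omega, by omega, by omega⟩
      rw [ht]; omega
  · -- s reached from t by t's clockwise turn: A's anticlockwise-inverse block finds t
    dsimp only at h1 h2 hrot hv
    subst h1; subst h2
    have hacw : get_new_direction_anticlockwise dx dy = some (tdx, tdy) :=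
      (pvCw_acw tdx tdy dx dy).mp hrot
    refine ⟨_, (pvMem_cands d _ _).mpr (Or.inr (Or.inl
      ⟨by omega, (tdx, tdy), by exact hacw, rfl⟩)), rfl, ?_, ?_, ?_⟩ <;>
      (try dsimp only)
    · omega
    · exact hc
    · omega
  · dsimp only at h1 h2 hrot hv
    subst h1; subst h2
    have hcw : get_new_direction_clockwise dx dy = some (tdx, tdy) :=
      (pvCw_acw dx dy tdx tdy).mpr hrot
    refine ⟨_, (pvMem_cands d _ _).mpr (Or.inr (Or.inr
      ⟨by omega, (tdx, tdy), by exact hcw, rfl⟩)), rfl, ?_, ?_, ?_⟩ <;>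
      (try dsimp only)
    · omega
    · exact hc
    · omega

-- ----- foldl (pvTryAdd d) facts -----

lemma pvTryAdd_cases (d : PySem.Dict (Int × Int × Int × Int) Int) (st)
    (e : (Int × Int × Int × Int) × Int × (Int × Int)) :
    pvTryAdd d st e = st
    ∨ (pvGuard d e ∧ e.1 ∉ st.1
        ∧ pvTryAdd d st e
            = (PySem.Set.add st.1 e.1, PySem.Set.add st.2.1 e.2.2, st.2.2 ++ [e.1])) := by
  unfold pvTryAdd
  split_ifs with h
  · exact Or.inr ⟨⟨h.1, h.2.1, h.2.2.1⟩, h.2.2.2, rfl⟩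
  · exact Or.inl rfl

lemma pvTryAdd_mem_first (d : PySem.Dict (Int × Int × Int × Int) Int) (st)
    (e : (Int × Int × Int × Int) × Int × (Int × Int)) (hg : pvGuard d e) :
    e.1 ∈ (pvTryAdd d st e).1 := by
  unfold pvTryAdd
  split_ifs with h
  · exact (PySem.Set.mem_add _ _ _).mpr (Or.inr rfl)
  · by_cases hm : e.1 ∈ st.1
    · exact hm
    · exact absurd ⟨hg.1, hg.2.1, hg.2.2, hm⟩ h

lemma pvFoldl_grow (d : PySem.Dict (Int × Int × Int × Int) Int)
    (l : List ((Int × Int × Int × Int) × Int × (Int × Int))) (st) :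
    (∀ u ∈ st.1, u ∈ (l.foldl (pvTryAdd d) st).1)
    ∧ (∀ p ∈ st.2.1, p ∈ (l.foldl (pvTryAdd d) st).2.1)
    ∧ (∀ q ∈ st.2.2, q ∈ (l.foldl (pvTryAdd d) st).2.2) := by
  induction l generalizing st with
  | nil => exact ⟨fun u hu => hu, fun p hp => hp, fun q hq => hq⟩
  | cons e t ih =>
    simp only [List.foldl_cons]
    refine ⟨fun u hu => (ih _).1 u ?_, fun p hp => (ih _).2.1 p ?_, fun q hq => (ih _).2.2 q ?_⟩ <;>
      rcases pvTryAdd_cases d st e with he | ⟨-, -, he⟩ <;> rw [he]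
    · exact hu
    · exact (PySem.Set.mem_add _ _ _).mpr (Or.inl hu)
    · exact hp
    · exact (PySem.Set.mem_add _ _ _).mpr (Or.inl hp)
    · exact hq
    · exact List.mem_append_left _ hq

lemma pvFoldl_sound (d : PySem.Dict (Int × Int × Int × Int) Int)
    (l : List ((Int × Int × Int × Int) × Int × (Int × Int))) (st) :
    ∀ u ∈ (l.foldl (pvTryAdd d) st).1, u ∈ st.1 ∨ ∃ e ∈ l, e.1 = u ∧ pvGuard d e := by
  induction l generalizing st with
  | nil => exact fun u hu => Or.inl hu
  | cons e t ih =>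
    intro u hu
    simp only [List.foldl_cons] at hu
    rcases ih _ u hu with hu' | ⟨e', he', rfl, hg⟩
    · rcases pvTryAdd_cases d st e with he | ⟨hg, -, he⟩
      · rw [he] at hu'; exact Or.inl hu'
      · rw [he] at hu'
        rcases (PySem.Set.mem_add _ _ _).mp hu' with h | h
        · exact Or.inl h
        · exact Or.inr ⟨e, List.mem_cons_self, h.symm, hg⟩
    · exact Or.inr ⟨e', List.mem_cons_of_mem _ he', rfl, hg⟩

lemma pvFoldl_queue_sub (d : PySem.Dict (Int × Int × Int × Int) Int)
    (l : List ((Int × Int × Int × Int) × Int × (Int × Int))) (st)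
    (h : ∀ q ∈ st.2.2, q ∈ st.1) :
    ∀ q ∈ (l.foldl (pvTryAdd d) st).2.2, q ∈ (l.foldl (pvTryAdd d) st).1 := by
  induction l generalizing st with
  | nil => exact h
  | cons e t ih =>
    simp only [List.foldl_cons]
    refine ih _ ?_
    rcases pvTryAdd_cases d st e with he | ⟨-, -, he⟩ <;> rw [he]
    · exact h
    · intro q hq
      rcases List.mem_append.mp hq with hq' | hq'
      · exact (PySem.Set.mem_add _ _ _).mpr (Or.inl (h q hq'))
      · exact (PySem.Set.mem_add _ _ _).mpr (Or.inr (List.mem_singleton.mp hq'))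

lemma pvFoldl_processes (d : PySem.Dict (Int × Int × Int × Int) Int)
    (l : List ((Int × Int × Int × Int) × Int × (Int × Int))) (st)
    (e) (he : e ∈ l) (hg : pvGuard d e) :
    e.1 ∈ (l.foldl (pvTryAdd d) st).1 := by
  induction l generalizing st with
  | nil => cases he
  | cons e' t ih =>
    simp only [List.foldl_cons]
    rcases List.mem_cons.mp he with rfl | he'
    · exact (pvFoldl_grow d t _).1 _ (pvTryAdd_mem_first d st e hg)
    · exact ih _ he'

lemma pvFoldl_new_queued (d : PySem.Dict (Int × Int × Int × Int) Int)
    (l : List ((Int × Int × Int × Int) × Int × (Int × Int))) (st) :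
    ∀ u ∈ (l.foldl (pvTryAdd d) st).1, u ∈ st.1 ∨ u ∈ (l.foldl (pvTryAdd d) st).2.2 := by
  induction l generalizing st with
  | nil => exact fun u hu => Or.inl hu
  | cons e t ih =>
    intro u hu
    simp only [List.foldl_cons] at hu ⊢
    rcases ih _ u hu with hu' | hq
    · rcases pvTryAdd_cases d st e with he | ⟨-, -, he⟩
      · rw [he] at hu'; exact Or.inl hu'
      · rw [he] at hu'
        rcases (PySem.Set.mem_add _ _ _).mp hu' with h | rfl
        · exact Or.inl h
        · refine Or.inr ((pvFoldl_grow d t _).2.2 _ ?_)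
          rw [he]; exact List.mem_append_right _ (List.mem_singleton.mpr rfl)
    · exact Or.inr hq

lemma pvFoldl_tiles (d : PySem.Dict (Int × Int × Int × Int) Int)
    (l : List ((Int × Int × Int × Int) × Int × (Int × Int))) (st) (e0 : Int × Int)
    (htile : ∀ e ∈ l, e.2.2 = (e.1.1, e.1.2.1))
    (hnd : st.2.1.Nodup)
    (hti : ∀ p, p ∈ st.2.1 ↔ p = e0 ∨ ∃ u ∈ st.1, (u.1, u.2.1) = p) :
    (l.foldl (pvTryAdd d) st).2.1.Nodup
    ∧ ∀ p, p ∈ (l.foldl (pvTryAdd d) st).2.1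
        ↔ p = e0 ∨ ∃ u ∈ (l.foldl (pvTryAdd d) st).1, (u.1, u.2.1) = p := by
  induction l generalizing st with
  | nil => exact ⟨hnd, hti⟩
  | cons e t ih =>
    simp only [List.foldl_cons]
    refine ih _ (fun e' he' => htile e' (List.mem_cons_of_mem _ he')) ?_ ?_
    · rcases pvTryAdd_cases d st e with he | ⟨-, -, he⟩ <;> rw [he]
      · exact hnd
      · exact PySem.Set.nodup_add _ _ hnd
    · have hte : e.2.2 = (e.1.1, e.1.2.1) := htile e List.mem_cons_self
      rcases pvTryAdd_cases d st e with he | ⟨-, -, he⟩ <;> rw [he] <;> intro p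
      · exact hti p
      · rw [PySem.Set.mem_add]
        constructor
        · rintro (hp | rfl)
          · rcases (hti p).mp hp with h | ⟨u, hu, hup⟩
            · exact Or.inl h
            · exact Or.inr ⟨u, (PySem.Set.mem_add _ _ _).mpr (Or.inl hu), hup⟩
          · exact Or.inr ⟨e.1, (PySem.Set.mem_add _ _ _).mpr (Or.inr rfl), hte.symm⟩
        · rintro (rfl | ⟨u, hu, hup⟩)
          · exact Or.inl ((hti p).mpr (Or.inl rfl))
          · rcases (PySem.Set.mem_add _ _ _).mp hu with hu' | rfl
            · exact Or.inl ((hti p).mpr (Or.inr ⟨u, hu', hup⟩))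
            · exact Or.inr (by rw [← hup, hte])

-- ----- BFS loop facts -----

lemma pvBFS_mono (d : PySem.Dict (Int × Int × Int × Int) Int) (inPath tiles queue) :
    ∀ u ∈ inPath, u ∈ (pvBFS d inPath tiles queue).1 := by
  fun_induction pvBFS d inPath tiles queue with
  | case1 inPath tiles => exact fun u hu => hu
  | case2 inPath tiles s rest st ih =>
    exact fun u hu => ih u ((pvFoldl_grow d (pvCands d s) (inPath, tiles, rest)).1 u hu)

lemma pvBFS_sound (d : PySem.Dict (Int × Int × Int × Int) Int)
    (M : List (Int × Int × Int × Int)) (hM : pvClosed d M) (inPath tiles queue) :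
    (∀ u ∈ inPath, u ∈ M) → (∀ q ∈ queue, q ∈ inPath) →
    ∀ u ∈ (pvBFS d inPath tiles queue).1, u ∈ M := by
  fun_induction pvBFS d inPath tiles queue with
  | case1 inPath tiles => exact fun hin hq u hu => hin u hu
  | case2 inPath tiles s rest st ih =>
    intro hin hq u hu
    refine ih ?_ ?_ u hu
    · intro v hv
      rcases pvFoldl_sound d (pvCands d s) (inPath, tiles, rest) v hv with hv' | ⟨e, he, rfl, hg⟩
      · exact hin v hv'
      · exact hM s (hin s (hq s List.mem_cons_self)) e.1 (pvCands_sound d s e he hg)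
    · exact pvFoldl_queue_sub d (pvCands d s) (inPath, tiles, rest)
        (fun q hq' => hq q (List.mem_cons_of_mem _ hq'))

lemma pvBFS_closed (d : PySem.Dict (Int × Int × Int × Int) Int) (inPath tiles queue) :
    (∀ q ∈ queue, q ∈ inPath) →
    (∀ s ∈ inPath, s ∉ queue → ∀ t, pvPred d t s → t ∈ inPath) →
    pvClosed d (pvBFS d inPath tiles queue).1 := by
  fun_induction pvBFS d inPath tiles queue with
  | case1 inPath tiles =>
    exact fun hq hx s hs t ht => hx s hs List.not_mem_nil t ht
  | case2 inPath tiles s rest st ih =>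
    intro hq hx
    refine ih ?_ ?_
    · exact pvFoldl_queue_sub d (pvCands d s) (inPath, tiles, rest)
        (fun q hq' => hq q (List.mem_cons_of_mem _ hq'))
    · -- every member of the new inPath that is off the new queue has all its preds present
      intro u hu hnq t ht
      set st' := (pvCands d s).foldl (pvTryAdd d) (inPath, tiles, rest) with hst
      rcases pvFoldl_new_queued d (pvCands d s) (inPath, tiles, rest) u hu with hu' | hq'
      · -- u was already in inPath
        by_cases hus : u = s
        · subst hus
          obtain ⟨e, he, he1, hg⟩ := pvCands_complete d u t ht
          rw [← he1]
          exact pvFoldl_processes d (pvCands d u) (inPath, tiles, rest) e he hg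
        · have hur : u ∉ rest := by
            intro hur
            exact hnq ((pvFoldl_grow d (pvCands d s) (inPath, tiles, rest)).2.2 u hur)
          have : t ∈ inPath :=
            hx u hu' (by simp [hus, hur]) t ht
          exact (pvFoldl_grow d (pvCands d s) (inPath, tiles, rest)).1 t this
      · exact absurd hq' hnq

lemma pvBFS_tiles (d : PySem.Dict (Int × Int × Int × Int) Int) (inPath tiles queue) (e0 : Int × Int) :
    tiles.Nodup →
    (∀ p, p ∈ tiles ↔ p = e0 ∨ ∃ u ∈ inPath, (u.1, u.2.1) = p) →
    (pvBFS d inPath tiles queue).2.Nodup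
    ∧ ∀ p, p ∈ (pvBFS d inPath tiles queue).2
        ↔ p = e0 ∨ ∃ u ∈ (pvBFS d inPath tiles queue).1, (u.1, u.2.1) = p := by
  fun_induction pvBFS d inPath tiles queue with
  | case1 inPath tiles => exact fun hnd hti => ⟨hnd, hti⟩
  | case2 inPath tiles s rest st ih =>
    intro hnd hti
    have h := pvFoldl_tiles d (pvCands d s) (inPath, tiles, rest) e0
      (fun e he => pvCands_tile d s e he) hnd hti
    exact ih h.1 h.2

-- ----- B-side facts -----

lemma pvMem_addIf {α : Type} [BEq α] [LawfulBEq α] (m : PySem.Set α) (k : α)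
    (c : Prop) [Decidable c] (t : α) :
    (t ∈ (if c then PySem.Set.add m k else m)) ↔ t ∈ m ∨ (c ∧ t = k) := by
  split_ifs with h
  · rw [PySem.Set.mem_add]; tauto
  · tauto

lemma pvPred_iff_conds (d : PySem.Dict (Int × Int × Int × Int) Int)
    (t : Int × Int × Int × Int) (x y dx dy : Int) :
    pvPred d t (x, y, dx, dy) ↔
      (0 ≤ d.getD (x, y, dx, dy) 0 - 1
        ∧ d.get? (x - dx, y - dy, dx, dy) = some (d.getD (x, y, dx, dy) 0 - 1)
        ∧ t = (x - dx, y - dy, dx, dy))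
      ∨ (0 ≤ d.getD (x, y, dx, dy) 0 - 1000
        ∧ ∃ pd, get_new_direction_anticlockwise dx dy = some pd
            ∧ d.get? (x, y, pd.1, pd.2) = some (d.getD (x, y, dx, dy) 0 - 1000)
            ∧ t = (x, y, pd.1, pd.2))
      ∨ (0 ≤ d.getD (x, y, dx, dy) 0 - 1000
        ∧ ∃ pd, get_new_direction_clockwise dx dy = some pd
            ∧ d.get? (x, y, pd.1, pd.2) = some (d.getD (x, y, dx, dy) 0 - 1000)
            ∧ t = (x, y, pd.1, pd.2)) := by
  obtain ⟨tx, ty, tdx, tdy⟩ := t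
  constructor
  · rintro ⟨hk, h0, hcase⟩
    have hc : PySem.Dict.contains d (tx, ty, tdx, tdy) = true :=
      (PySem.Dict.contains_iff_mem_keys d _).mpr hk
    rcases hcase with ⟨hs, hv⟩ | ⟨h1, h2, hrot, hv⟩ | ⟨h1, h2, hrot, hv⟩
    · dsimp only at hs
      simp only [Prod.mk.injEq] at hs
      obtain ⟨e1, e2, e3, e4⟩ := hs
      refine Or.inl ⟨by omega, ?_, ?_⟩
      · have ht : ((x - dx, y - dy, dx, dy) : Int × Int × Int × Int) = (tx, ty, tdx, tdy) := by
          simp only [Prod.mk.injEq]; refine ⟨by omega, by omega, by omega, by omega⟩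
        rw [ht, (pvGet?_eq_some_iff d _ _)]
        exact ⟨hc, by omega⟩
      · simp only [Prod.mk.injEq]; refine ⟨by omega, by omega, by omega, by omega⟩
    · dsimp only at h1 h2 hrot
      subst h1; subst h2
      refine Or.inr (Or.inl ⟨by omega, (tdx, tdy), (pvCw_acw tdx tdy dx dy).mp hrot, ?_, rfl⟩)
      rw [pvGet?_eq_some_iff d _ _]
      refine ⟨hc, ?_⟩; dsimp only; omega
    · dsimp only at h1 h2 hrot
      subst h1; subst h2
      refine Or.inr (Or.inr ⟨by omega, (tdx, tdy), (pvCw_acw dx dy tdx tdy).mpr hrot, ?_, rfl⟩)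
      rw [pvGet?_eq_some_iff d _ _]
      refine ⟨hc, ?_⟩; dsimp only; omega
  · rintro (⟨h0, hget, ht⟩ | ⟨h0, pd, hpd, hget, ht⟩ | ⟨h0, pd, hpd, hget, ht⟩) <;>
      rw [pvGet?_eq_some_iff d _ _] at hget <;>
      obtain ⟨hc, hv⟩ := hget <;>
      rw [ht] <;>
      refine ⟨(PySem.Dict.contains_iff_mem_keys d _).mp hc, by (try dsimp only); omega, ?_⟩
    · refine Or.inl ⟨?_, by (try dsimp only); omega⟩
      (try dsimp only)
      have e1 : x = x - dx + dx := by omega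
      have e2 : y = y - dy + dy := by omega
      rw [← e1, ← e2]
    · exact Or.inr (Or.inl ⟨rfl, rfl, (pvCw_acw pd.1 pd.2 dx dy).mpr (by simpa using hpd),
        by (try dsimp only); omega⟩)
    · exact Or.inr (Or.inr ⟨rfl, rfl, (pvCw_acw dx dy pd.1 pd.2).mp (by simpa using hpd),
        by (try dsimp only); omega⟩)

lemma pvIf_if_add {α : Type} [BEq α] (P C : Prop) [Decidable P] [Decidable C]
    (X : PySem.Set α) (k : α) :
    (if P then (if C then PySem.Set.add X k else X) else X)
      = if P ∧ C then PySem.Set.add X k else X := by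
  split_ifs with h1 h2 h3 <;> first | rfl | tauto

lemma pvExpand_mem (d : PySem.Dict (Int × Int × Int × Int) Int) (m s t) :
    t ∈ pvExpand d m s ↔ t ∈ m ∨ pvPred d t s := by
  obtain ⟨x, y, dx, dy⟩ := s
  rw [pvPred_iff_conds d t x y dx dy]
  cases hacw : get_new_direction_anticlockwise dx dy with
  | none =>
    cases hcw : get_new_direction_clockwise dx dy with
    | none =>
      simp only [pvExpand, hacw, hcw, ite_self, pvIf_if_add, pvMem_addIf]
      simp only [hacw, hcw, reduceCtorEq, false_and, and_false, exists_false, or_false]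
      tauto
    | some pd2 =>
      simp only [pvExpand, hacw, hcw, ite_self, pvIf_if_add, pvMem_addIf]
      simp only [hacw, hcw, reduceCtorEq, Option.some.injEq, false_and, and_false,
        exists_false, or_false, exists_eq_left']
      tauto
  | some pd1 =>
    cases hcw : get_new_direction_clockwise dx dy with
    | none =>
      simp only [pvExpand, hacw, hcw, ite_self, pvIf_if_add, pvMem_addIf]
      simp only [hacw, hcw, reduceCtorEq, Option.some.injEq, false_and, and_false,
        exists_false, or_false, exists_eq_left']
      tauto
    | some pd2 =>
      simp only [pvExpand, hacw, hcw, ite_self, pvIf_if_add, pvMem_addIf]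
      simp only [hacw, hcw, reduceCtorEq, Option.some.injEq, false_and, and_false,
        exists_false, or_false, exists_eq_left']
      tauto

lemma pvExpand_grow (d : PySem.Dict (Int × Int × Int × Int) Int) (m s) :
    ∀ u ∈ m, u ∈ pvExpand d m s :=
  fun u hu => (pvExpand_mem d m s u).mpr (Or.inl hu)

lemma pvSweep_mono (d : PySem.Dict (Int × Int × Int × Int) Int)
    (l : List (Int × Int × Int × Int)) (m) :
    ∀ u ∈ m, u ∈ l.foldl (fun m s => if s ∈ m then pvExpand d m s else m) m := by
  induction l generalizing m with
  | nil => exact fun u hu => hu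
  | cons s t ih =>
    intro u hu
    simp only [List.foldl_cons]
    refine ih _ u ?_
    split_ifs with hs
    · exact pvExpand_grow d m s u hu
    · exact hu

lemma pvSweep_sound (d : PySem.Dict (Int × Int × Int × Int) Int)
    (M : List (Int × Int × Int × Int)) (hM : pvClosed d M)
    (l : List (Int × Int × Int × Int)) (m) :
    (∀ u ∈ m, u ∈ M) →
    ∀ u ∈ l.foldl (fun m s => if s ∈ m then pvExpand d m s else m) m, u ∈ M := by
  induction l generalizing m with
  | nil => exact fun hm => hm
  | cons s t ih =>
    intro hm
    simp only [List.foldl_cons]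
    refine ih _ ?_
    split_ifs with hs
    · intro u hu
      rcases (pvExpand_mem d m s u).mp hu with hu' | hp
      · exact hm u hu'
      · exact hM s (hm s hs) u hp
    · exact hm

lemma pvSweep_closed (d : PySem.Dict (Int × Int × Int × Int) Int)
    (l : List (Int × Int × Int × Int)) (m) :
    (∀ u ∈ m, u ∈ d.keys) →
    l.Pairwise (fun a b => d.getD b 0 ≤ d.getD a 0) →
    (∀ k ∈ d.keys, k ∉ l → ∀ j ∈ l, d.getD j 0 ≤ d.getD k 0) →
    (∀ u ∈ m, u ∉ l → ∀ t, pvPred d t u → t ∈ m) →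
    pvClosed d (l.foldl (fun m s => if s ∈ m then pvExpand d m s else m) m) := by
  induction l generalizing m with
  | nil => exact fun hker hpair hproc hexp s hs t ht => hexp s hs (List.not_mem_nil) t ht
  | cons u tail ih =>
    intro hker hpair hproc hexp
    simp only [List.foldl_cons]
    have hpair' := (List.pairwise_cons.mp hpair)
    refine ih _ ?_ hpair'.2 ?_ ?_
    · -- membership in keys is preserved
      split_ifs with hu
      · intro v hv
        rcases (pvExpand_mem d m u v).mp hv with hv' | hp
        · exact hker v hv'
        · exact hp.1
      · exact hker
    · -- every key off the remaining list has cost ≥ everything still in it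
      intro k hk hkt j hj
      by_cases hku : k = u
      · subst hku; exact hpair'.1 j hj
      · exact hproc k hk (by simp [hku, hkt]) j (List.mem_cons_of_mem _ hj)
    · -- expanded-members invariant for the tail
      split_ifs with hu
      · intro v hv hvt t ht
        rcases (pvExpand_mem d m u v).mp hv with hv' | hp
        · by_cases hvu : v = u
          · subst hvu
            exact (pvExpand_mem d m v t).mpr (Or.inr ht)
          · exact pvExpand_grow d m u t (hexp v hv' (by simp [hvu, hvt]) t ht)
        · -- v is a fresh predecessor of u: its cost is strictly below u's, so v is still in the tail
          exfalso
          have hvc : d.getD v 0 < d.getD u 0 := by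
            obtain ⟨-, h0, hcase⟩ := hp
            rcases hcase with ⟨-, hv'⟩ | ⟨-, -, -, hv'⟩ | ⟨-, -, -, hv'⟩ <;> omega
          have hvu : v ≠ u := by
            intro h; rw [h] at hvc; omega
          have : d.getD u 0 ≤ d.getD v 0 :=
            hproc v hp.1 (by simp [hvu, hvt]) u List.mem_cons_self
          omega
      · intro v hv hvt t ht
        have hvu : v ≠ u := by
          intro h; rw [h] at hv; exact hu hv
        exact hexp v hv (by simp [hvu, hvt]) t ht

theorem find_shortest_path_tiles_agree (visited : List (Int × Int × Int × Int × Int)) (end_ : Int × Int) :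
    find_shortest_path_tiles visited end_ = find_shortest_path_tiles_alt visited end_ := by
  simp only [find_shortest_path_tiles, find_shortest_path_tiles_alt]
  split_ifs with hempty
  · rfl
  · -- shared data
    set d := pvDictOf visited with hd
    set end_states := d.keys.filter (fun s => decide (s.1 = end_.1 ∧ s.2.1 = end_.2)) with hes
    set min_cost := (PySem.List.min? (end_states.map (fun s => d.getD s 0)) (fun v => v)).getD 0
      with hmc
    set seeds := end_states.filter (fun s => decide (d.getD s 0 = min_cost)) with hsd
    set e : Int × Int := (end_.1, end_.2) with he
    set order := PySem.List.sorted d.keys (fun k => d.getD k 0) true with hor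
    have hseeds_keys : ∀ u ∈ seeds, u ∈ d.keys := by
      intro u hu
      exact (List.mem_filter.mp (List.mem_filter.mp hu).1).1
    have hseeds_pos : ∀ u ∈ seeds, (u.1, u.2.1) = e := by
      intro u hu
      have := (List.mem_filter.mp (List.mem_filter.mp hu).1).2
      rw [decide_eq_true_iff] at this
      rw [he, this.1, this.2]
    have horder_mem : ∀ k ∈ d.keys, k ∈ order := by
      intro k hk
      rw [hor, PySem.List.mem_sorted]
      exact hk
    -- the two closures
    set F := pvBFS d (PySem.Set.ofList seeds) (PySem.Set.add PySem.Set.empty e) seeds with hF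
    set M := order.foldl (fun m s => if s ∈ m then pvExpand d m s else m)
      (PySem.Set.ofList seeds) with hM
    have hq0 : ∀ q ∈ seeds, q ∈ PySem.Set.ofList seeds :=
      fun q hq => (PySem.Set.mem_ofList _ _).mpr hq
    have hx0 : ∀ s ∈ PySem.Set.ofList seeds, s ∉ seeds → ∀ t, pvPred d t s → t ∈ PySem.Set.ofList seeds := by
      intro s hs hns
      exact absurd ((PySem.Set.mem_ofList _ _).mp hs) hns
    have hFclosed : pvClosed d F.1 := pvBFS_closed d _ _ _ hq0 hx0
    have hFmono : ∀ u ∈ PySem.Set.ofList seeds, u ∈ F.1 := pvBFS_mono d _ _ _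
    have hMclosed : pvClosed d M := by
      refine pvSweep_closed d order _ ?_ ?_ ?_ ?_
      · exact fun u hu => hseeds_keys u ((PySem.Set.mem_ofList _ _).mp hu)
      · rw [hor]; exact PySem.List.sorted_pairwise_rev _ _
      · intro k hk hkl
        exact absurd (horder_mem k hk) hkl
      · intro u hu hul
        exact absurd (horder_mem u (hseeds_keys u ((PySem.Set.mem_ofList _ _).mp hu))) hul
    have hMmono : ∀ u ∈ PySem.Set.ofList seeds, u ∈ M := pvSweep_mono d order _
    have hFM : ∀ u, u ∈ F.1 ↔ u ∈ M := by
      intro u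
      constructor
      · exact fun hu => pvBFS_sound d M hMclosed _ _ _ hMmono hq0 u hu
      · exact fun hu => pvSweep_sound d F.1 hFclosed order _ hFmono u hu
    -- tile sets
    have hti0 : ∀ p, p ∈ PySem.Set.add PySem.Set.empty e
        ↔ p = e ∨ ∃ u ∈ PySem.Set.ofList seeds, (u.1, u.2.1) = p := by
      intro p
      rw [PySem.Set.mem_add]
      constructor
      · rintro (hp | rfl)
        · cases hp
        · exact Or.inl rfl
      · rintro (rfl | ⟨u, hu, hup⟩)
        · exact Or.inr rfl
        · exact Or.inr (by rw [← hup, hseeds_pos u ((PySem.Set.mem_ofList _ _).mp hu)])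
    have htilesA := pvBFS_tiles d (PySem.Set.ofList seeds) (PySem.Set.add PySem.Set.empty e) seeds e
      (PySem.Set.nodup_add _ _ List.nodup_nil) hti0
    have hBnodup : (PySem.Set.union (PySem.Set.ofList [e]) (M.map (fun s => (s.1, s.2.1)))).Nodup :=
      PySem.Set.nodup_union _ _ (PySem.Set.nodup_ofList _)
    have hBmem : ∀ p, p ∈ PySem.Set.union (PySem.Set.ofList [e]) (M.map (fun s => (s.1, s.2.1)))
        ↔ p = e ∨ ∃ u ∈ M, (u.1, u.2.1) = p := by
      intro p
      rw [PySem.Set.mem_union, PySem.Set.mem_ofList]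
      simp only [List.mem_singleton, List.mem_map]
    have hperm : F.2.Perm (PySem.Set.union (PySem.Set.ofList [e]) (M.map (fun s => (s.1, s.2.1)))) := by
      rw [List.perm_ext_iff_of_nodup htilesA.1 hBnodup]
      intro p
      rw [htilesA.2 p, hBmem p]
      constructor
      · rintro (rfl | ⟨u, hu, hup⟩)
        · exact Or.inl rfl
        · exact Or.inr ⟨u, (hFM u).mp hu, hup⟩
      · rintro (rfl | ⟨u, hu, hup⟩)
        · exact Or.inl rfl
        · exact Or.inr ⟨u, (hFM u).mpr hu, hup⟩
    exact congrArg Int.ofNat hperm.length_eq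

-- ===== VERDICT (by name: the statement is the Claim_ definition above) =====
theorem find_shortest_path_tiles_spec : Claim_equal_find_shortest_path_tiles := by
  intro visited end_ _ _
  unfold Spec_find_shortest_path_tiles
  exact find_shortest_path_tiles_agree visited end_
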